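-- pv_equiv track=rewrite | github.com/RodriCamio/Python_Ejercicios | Ejercicio_8.py | multiplos
-- ===== SOURCE A (Python) =====
-- def multiplos(a):
--     inicio = 1
--     multi = []
--     while inicio <= a:
--         if inicio%3 == 0 or inicio%5 == 0:
--             multi.append(inicio)
--             inicio += 1
--         else:
--             inicio += 1
--     return multi
-- ===== SOURCE B (Python) =====
-- def multiplos(a):
--     return sorted(set(range(3, a + 1, 3)) | set(range(5, a + 1, 5)))
-- ===== Notes on version B (the rewrite author's own statement) =====
-- stated objective: alternative
-- what changed: B generates the multiples of three and of five directly as stepped ranges, unions them as a set and sorts, instead of scanning every integer up to a and testing divisibility.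
import Mathlib
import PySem

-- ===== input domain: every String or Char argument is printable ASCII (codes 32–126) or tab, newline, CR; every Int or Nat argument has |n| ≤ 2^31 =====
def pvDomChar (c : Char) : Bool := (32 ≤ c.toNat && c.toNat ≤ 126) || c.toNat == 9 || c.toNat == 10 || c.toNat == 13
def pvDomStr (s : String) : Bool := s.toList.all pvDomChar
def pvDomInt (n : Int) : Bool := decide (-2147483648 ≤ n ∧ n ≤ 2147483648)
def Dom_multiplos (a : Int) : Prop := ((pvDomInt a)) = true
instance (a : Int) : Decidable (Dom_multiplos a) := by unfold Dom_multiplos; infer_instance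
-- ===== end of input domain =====

-- B replaces the per-integer divisibility scan of A by directly generating the multiples
-- of 3 and of 5 as stepped ranges, deduplicating them as a set and sorting (objective: alternative).


-- ===== PORT A =====
-- A's while loop: append inicio when divisible by 3 or 5, then increment inicio.
def multiplosLoop (a inicio : Int) (multi : List Int) : List Int :=
  if h : inicio ≤ a then
    if PySem.Int.mod inicio 3 == 0 || PySem.Int.mod inicio 5 == 0 then
      multiplosLoop a (inicio + 1) (multi ++ [inicio])
    else
      multiplosLoop a (inicio + 1) multi
  else multi
termination_by (a + 1 - inicio).toNat
decreasing_by all_goals omega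

def multiplos (a : Int) : List Int := multiplosLoop a 1 []

-- ===== PORT B =====
-- sorted(set(range(3, a+1, 3)) | set(range(5, a+1, 5)))
def multiplos_alt (a : Int) : List Int :=
  PySem.List.sorted
    (PySem.Set.ofList (PySem.List.pyRange 3 (a + 1) 3 ++ PySem.List.pyRange 5 (a + 1) 5))
    (fun x => x)

-- ===== PRECONDITION & SPEC =====
def Spec_multiplos (a : Int) (out : List Int) : Prop := out = multiplos_alt a
instance (a : Int) (out : List Int) : Decidable (Spec_multiplos a out) := by unfold Spec_multiplos; infer_instance

-- ===== CLAIM (what is proved, stated in full; the proofs are below) =====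
def Claim_equal_multiplos : Prop := ∀ (a : Int), Dom_multiplos a → Spec_multiplos a (multiplos a)

-- ===== LEMMAS AND PROOFS =====

-- A's loop, characterised: it appends the filtered range [inicio, a] to the accumulator.
theorem multiplosLoop_eq (a : Int) :
    ∀ (n : Nat) (lo : Int), (a + 1 - lo).toNat = n → ∀ (multi : List Int),
      multiplosLoop a lo multi =
        multi ++ (PySem.List.pyRange lo (a + 1)).filter
          (fun i => PySem.Int.mod i 3 == 0 || PySem.Int.mod i 5 == 0) := by
  intro n
  induction n with
  | zero =>
    intro lo hlo multi
    have hge : a < lo := by omega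
    have hnil : PySem.List.pyRange lo (a + 1) = [] := by
      apply List.eq_nil_iff_forall_not_mem.mpr
      intro x hx
      rw [PySem.List.mem_pyRange_one] at hx
      omega
    rw [multiplosLoop, dif_neg (by omega), hnil]
    simp
  | succ n ih =>
    intro lo hlo multi
    by_cases hle : lo ≤ a
    · rw [multiplosLoop, dif_pos hle, PySem.List.pyRange_one_cons (by omega : lo < a + 1),
        List.filter_cons]
      by_cases hc : (PySem.Int.mod lo 3 == 0 || PySem.Int.mod lo 5 == 0) = true
      · rw [if_pos hc, hc, ih (lo + 1) (by omega) (multi ++ [lo])]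
        simp
      · simp only [if_neg hc]
        exact ih (lo + 1) (by omega) multi
    · exact absurd (by omega : lo ≤ a) hle

theorem pyRange_one_pairwise_lt (b : Int) :
    ∀ (n : Nat) (lo : Int), (b - lo).toNat = n →
      (PySem.List.pyRange lo b).Pairwise (· < ·) := by
  intro n
  induction n with
  | zero =>
    intro lo hlo
    have hnil : PySem.List.pyRange lo b = [] := by
      apply List.eq_nil_iff_forall_not_mem.mpr
      intro x hx
      rw [PySem.List.mem_pyRange_one] at hx
      omega
    simp [hnil]
  | succ n ih =>
    intro lo hlo
    by_cases hlt : lo < b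
    · rw [PySem.List.pyRange_one_cons hlt]
      refine List.Pairwise.cons ?_ (ih (lo + 1) (by omega))
      intro x hx
      rw [PySem.List.mem_pyRange_one] at hx
      omega
    · omega

theorem multiplos_spec_aux (a : Int) : multiplos a = multiplos_alt a := by
  set cond : Int → Bool := fun i => PySem.Int.mod i 3 == 0 || PySem.Int.mod i 5 == 0 with hcond
  have hcond_iff : ∀ i, cond i = true ↔ (3 ∣ i ∨ 5 ∣ i) := by
    intro i
    simp only [hcond, Bool.or_eq_true, beq_iff_eq, PySem.Int.mod_eq_zero_iff_dvd]
  have hA : multiplos a = (PySem.List.pyRange 1 (a + 1)).filter cond :=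
    multiplosLoop_eq a (a + 1 - 1).toNat 1 rfl []
  set ys : List Int := (PySem.List.pyRange 1 (a + 1)).filter cond with hys
  have hpw : ys.Pairwise (· < ·) :=
    List.Pairwise.filter _ (pyRange_one_pairwise_lt (a + 1) (a + 1 - 1).toNat 1 rfl)
  have hmem : ∀ i : Int, i ∈ ys ↔ (1 ≤ i ∧ i < a + 1 ∧ (3 ∣ i ∨ 5 ∣ i)) := by
    intro i
    rw [hys, List.mem_filter, PySem.List.mem_pyRange_one, hcond_iff]
    tauto
  rw [hA, multiplos_alt]
  refine (PySem.List.sorted_eq_of_perm_of_pairwise_lt _ _ _ ?_ hpw).symm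
  rw [List.perm_ext_iff_of_nodup (hpw.imp ne_of_lt) (PySem.Set.nodup_ofList _)]
  intro i
  rw [hmem, PySem.Set.mem_ofList, List.mem_append,
    PySem.List.mem_pyRange_iff_of_pos (by norm_num) i,
    PySem.List.mem_pyRange_iff_of_pos (by norm_num) i]
  omega

-- ===== VERDICT (by name: the statement is the Claim_ definition above) =====
theorem multiplos_spec : Claim_equal_multiplos := by
  intro a _
  exact multiplos_spec_aux a
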